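-- pv_equiv track=rewrite | github.com/zhanglp8181/smartContext | core/compression.py | _check_technical_term_proximity
-- ===== SOURCE A (Python) =====
-- def _check_technical_term_proximity(text: str, keywords: list) -> bool:
--     """检查技术术语是否在相近的位置出现"""
--     # 找到所有关键词在文本中的位置
--     positions = []
--     for keyword in keywords:
--         pos = text.lower().find(keyword.lower())
--         if pos != -1:
--             positions.append(pos)
--
--     # 如果至少有两个关键词，检查它们是否在合理距离内
--     if len(positions) >= 2:
--         positions.sort()
--         # 检查相邻关键词的距离
--         for i in range(len(positions) - 1):
--             if positions[i+1] - positions[i] < 200:  # 200字符内的距离认为是相近的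
--                 return True
--
--     return False
-- ===== SOURCE B (Python) =====
-- def _check_technical_term_proximity(text: str, keywords: list) -> bool:
--     low = text.lower()
--     positions = []
--     for keyword in keywords:
--         pos = low.find(keyword.lower())
--         if pos != -1:
--             positions.append(pos)
--     # direct pairwise scan instead of sort + adjacent-gap scan
--     for i in range(len(positions)):
--         for j in range(i + 1, len(positions)):
--             if abs(positions[i] - positions[j]) < 200:
--                 return True
--     return False
-- ===== Notes on version B (the rewrite author's own statement) =====
-- stated objective: alternative
-- what changed: Replaces A's sort-then-adjacent-gap scan with a direct nested pairwise scan over the collected first-occurrence positions (equivalent because in sorted order the minimum gap is between adjacent elements), and hoists text.lower() out of the keyword loop instead of recomputing it per keyword.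
import Mathlib
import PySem

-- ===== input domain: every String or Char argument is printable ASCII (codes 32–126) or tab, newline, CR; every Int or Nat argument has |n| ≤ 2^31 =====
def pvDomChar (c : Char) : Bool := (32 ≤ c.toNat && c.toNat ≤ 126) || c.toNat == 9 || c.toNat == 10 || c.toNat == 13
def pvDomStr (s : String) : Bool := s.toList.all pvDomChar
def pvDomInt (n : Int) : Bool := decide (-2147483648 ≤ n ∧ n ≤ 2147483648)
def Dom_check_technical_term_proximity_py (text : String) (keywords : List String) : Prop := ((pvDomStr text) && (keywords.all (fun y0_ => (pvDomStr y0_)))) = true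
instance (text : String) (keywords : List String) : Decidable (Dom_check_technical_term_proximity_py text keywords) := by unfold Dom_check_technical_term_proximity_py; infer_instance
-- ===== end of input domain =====

-- B replaces A's sort-then-adjacent-gap scan with a direct nested pairwise scan over the
-- collected positions (alternative algorithm, same result; both programs share the
-- position-collection loop, kept as the helper pvCollect).

-- ===== PORT A =====
-- position-collection loop, identical line for line in A and in B
def pvCollect (text : String) (keywords : List String) : List Int :=
  keywords.foldl (fun acc keyword =>
    let pos := PySem.Str.find (PySem.Str.lower text) (PySem.Str.lower keyword)
    if pos ≠ -1 then acc ++ [pos] else acc) []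

def check_technical_term_proximity_py (text : String) (keywords : List String) : Bool :=
  let positions := pvCollect text keywords
  if 2 ≤ positions.length then
    let s := PySem.List.sorted positions (fun x => x) false
    -- 'for i in range(len(positions)-1): if s[i+1]-s[i] < 200: return True' as an any-fold
    (PySem.List.pyRange 0 ((s.length : Int) - 1) 1).any (fun i =>
      decide (PySem.List.pyGetD s (i + 1) 0 - PySem.List.pyGetD s i 0 < 200))
  else false

-- ===== PORT B =====
def check_technical_term_proximity_py_alt (text : String) (keywords : List String) : Bool :=
  let positions := pvCollect text keywords
  (PySem.List.pyRange 0 (positions.length : Int) 1).any (fun i =>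
    (PySem.List.pyRange (i + 1) (positions.length : Int) 1).any (fun j =>
      decide (|PySem.List.pyGetD positions i 0 - PySem.List.pyGetD positions j 0| < 200)))

-- ===== PRECONDITION & SPEC =====
def Spec_check_technical_term_proximity_py (text : String) (keywords : List String) (out : Bool) : Prop := out = check_technical_term_proximity_py_alt text keywords
instance (text : String) (keywords : List String) (out : Bool) : Decidable (Spec_check_technical_term_proximity_py text keywords out) := by unfold Spec_check_technical_term_proximity_py; infer_instance

-- ===== CLAIM (what is proved, stated in full; the proofs are below) =====
def Claim_equal_check_technical_term_proximity_py : Prop := ∀ (text : String) (keywords : List String), Dom_check_technical_term_proximity_py text keywords → Spec_check_technical_term_proximity_py text keywords (check_technical_term_proximity_py text keywords)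

-- ===== LEMMAS AND PROOFS =====

-- B's nested any-scan holds iff some index pair i < j is closer than 200
lemma pairAny_iff (m : List Int) :
    ((PySem.List.pyRange 0 (m.length : Int) 1).any (fun i =>
      (PySem.List.pyRange (i + 1) (m.length : Int) 1).any (fun j =>
        decide (|PySem.List.pyGetD m i 0 - PySem.List.pyGetD m j 0| < 200))) = true)
    ↔ ∃ (i j : ℕ) (hi : i < m.length) (hj : j < m.length), i < j ∧ |m[i] - m[j]| < 200 := by
  simp only [List.any_eq_true, PySem.List.mem_pyRange_one, decide_eq_true_eq]
  constructor
  · rintro ⟨i, ⟨hi0, hil⟩, j, ⟨hji, hjl⟩, hc⟩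
    refine ⟨i.toNat, j.toNat, by omega, by omega, by omega, ?_⟩
    rwa [PySem.List.pyGetD_eq_getElem m 0 (by omega) (by omega),
         PySem.List.pyGetD_eq_getElem m 0 (by omega) (by omega)] at hc
  · rintro ⟨i, j, hi, hj, hij, hc⟩
    refine ⟨(i : Int), ⟨by omega, by omega⟩, (j : Int), ⟨by omega, by omega⟩, ?_⟩
    rw [PySem.List.pyGetD_eq_getElem m 0 (by omega) (by omega),
        PySem.List.pyGetD_eq_getElem m 0 (by omega) (by omega)]
    simpa using hc

-- A's adjacent-gap scan holds iff some adjacent gap in s is < 200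
lemma adjAny_iff (s : List Int) :
    ((PySem.List.pyRange 0 ((s.length : Int) - 1) 1).any (fun i =>
      decide (PySem.List.pyGetD s (i + 1) 0 - PySem.List.pyGetD s i 0 < 200)) = true)
    ↔ ∃ (i : ℕ) (h : i + 1 < s.length), s[i + 1] - s[i] < 200 := by
  simp only [List.any_eq_true, PySem.List.mem_pyRange_one, decide_eq_true_eq]
  constructor
  · rintro ⟨i, ⟨hi0, hil⟩, hc⟩
    refine ⟨i.toNat, by omega, ?_⟩
    rw [PySem.List.pyGetD_eq_getElem s 0 (by omega) (by omega),
        PySem.List.pyGetD_eq_getElem s 0 (by omega) (by omega)] at hc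
    simpa only [show (i + 1).toNat = i.toNat + 1 from by omega] using hc
  · rintro ⟨i, h, hc⟩
    refine ⟨(i : Int), ⟨by omega, by omega⟩, ?_⟩
    rw [PySem.List.pyGetD_eq_getElem s 0 (by omega) (by omega),
        PySem.List.pyGetD_eq_getElem s 0 (by omega) (by omega)]
    simpa [show ((i : Int) + 1).toNat = i + 1 by omega] using hc

-- index-pair form ↔ two-element-sublist form
lemma idx_iff_sublist (m : List Int) :
    (∃ (i j : ℕ) (hi : i < m.length) (hj : j < m.length), i < j ∧ |m[i] - m[j]| < 200)
    ↔ ∃ x y, |x - y| < 200 ∧ [x, y].Sublist m := by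
  constructor
  · rintro ⟨i, j, hi, hj, hij, hc⟩
    refine ⟨m[i], m[j], hc, ?_⟩
    rw [List.cons_sublist_iff]
    refine ⟨m.take (i + 1), m.drop (i + 1), (List.take_append_drop _ _).symm, ?_, ?_⟩
    · have h1 : i < (m.take (i + 1)).length := by simp; omega
      have := List.getElem_mem h1
      rwa [List.getElem_take] at this
    · rw [List.singleton_sublist]
      have h2 : j - (i + 1) < (m.drop (i + 1)).length := by simp; omega
      refine List.mem_iff_getElem.mpr ⟨j - (i + 1), h2, ?_⟩
      rw [List.getElem_drop]
      simp only [show i + 1 + (j - (i + 1)) = j from by omega]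
  · rintro ⟨x, y, hc, hs⟩
    rw [List.cons_sublist_iff] at hs
    obtain ⟨r₁, r₂, rfl, hx, hy⟩ := hs
    rw [List.singleton_sublist] at hy
    obtain ⟨i, hi, rfl⟩ := List.getElem_of_mem hx
    obtain ⟨j, hj, rfl⟩ := List.getElem_of_mem hy
    refine ⟨i, r₁.length + j, by simp; omega, by simp; omega, by omega, ?_⟩
    rw [List.getElem_append_left (by omega), List.getElem_append_right (by omega)]
    simpa only [show r₁.length + j - r₁.length = j from by omega] using hc

lemma perm_pair_aux {α : Type} {l : List α} {x y : α} (h : l.Perm [x, y]) :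
    l = [x, y] ∨ l = [y, x] := by
  have hl : l.length = 2 := by simpa using h.length_eq
  obtain ⟨a, b, rfl⟩ := List.length_eq_two.mp hl
  have ha : a ∈ [x, y] := h.mem_iff.mp (by simp)
  rcases (by simpa using ha : a = x ∨ a = y) with rfl | rfl
  · left
    have := h.cons_inv
    simp [List.perm_singleton] at this
    simp [this]
  · right
    have h2 : (a :: [b]).Perm [a, x] := h.trans (List.Perm.swap _ _ _)
    have := h2.cons_inv
    simp [List.perm_singleton] at this
    simp [this]

-- the sublist form is invariant under permutation (closeness is symmetric)
lemma sublist_form_of_perm {m m' : List Int} (h : m.Perm m') :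
    (∃ x y, |x - y| < 200 ∧ [x, y].Sublist m) → ∃ x y, |x - y| < 200 ∧ [x, y].Sublist m' := by
  rintro ⟨x, y, hc, hs⟩
  have hsp : [x, y].Subperm m' := (hs.subperm).trans h.subperm
  obtain ⟨l', hp, hs'⟩ := hsp
  rcases perm_pair_aux hp with rfl | rfl
  · exact ⟨x, y, hc, hs'⟩
  · exact ⟨y, x, by rwa [abs_sub_comm], hs'⟩

-- on a (nondecreasingly) sorted list, a close pair exists iff a close ADJACENT pair exists
lemma sorted_pair_iff_adj (s : List Int)
    (hmono : ∀ (p q : ℕ) (hpq : p ≤ q) (hq : q < s.length),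
      s[p]'(lt_of_le_of_lt hpq hq) ≤ s[q]) :
    (∃ (i j : ℕ) (hi : i < s.length) (hj : j < s.length), i < j ∧ |s[i] - s[j]| < 200)
    ↔ ∃ (i : ℕ) (h : i + 1 < s.length), s[i + 1] - s[i] < 200 := by
  constructor
  · rintro ⟨i, j, hi, hj, hij, hc⟩
    have h1 : s[i] ≤ s[j] := hmono i j (by omega) hj
    have h2 : s[i + 1]'(by omega) ≤ s[j] := hmono (i + 1) j (by omega) hj
    refine ⟨i, by omega, ?_⟩
    have : |s[i] - s[j]| = s[j] - s[i] := by rw [abs_sub_comm]; exact abs_of_nonneg (by omega)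
    omega
  · rintro ⟨i, h, hc⟩
    have h1 : s[i]'(by omega) ≤ s[i + 1] := hmono i (i + 1) (by omega) h
    refine ⟨i, i + 1, by omega, h, by omega, ?_⟩
    have : |s[i]'(by omega) - s[i + 1]| = s[i + 1] - s[i]'(by omega) := by
      rw [abs_sub_comm]; exact abs_of_nonneg (by omega)
    omega

-- the two scans agree on every position list
lemma main_lemma (l : List Int) :
    (if 2 ≤ l.length then
      (PySem.List.pyRange 0 (((PySem.List.sorted l (fun x => x) false).length : Int) - 1) 1).any
        (fun i => decide (PySem.List.pyGetD (PySem.List.sorted l (fun x => x) false) (i + 1) 0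
                  - PySem.List.pyGetD (PySem.List.sorted l (fun x => x) false) i 0 < 200))
    else false)
    = (PySem.List.pyRange 0 (l.length : Int) 1).any (fun i =>
        (PySem.List.pyRange (i + 1) (l.length : Int) 1).any (fun j =>
          decide (|PySem.List.pyGetD l i 0 - PySem.List.pyGetD l j 0| < 200))) := by
  set s := PySem.List.sorted l (fun x => x) false with hs
  have hperm : s.Perm l := by simp only [hs]; exact PySem.List.sorted_perm _ _ _
  have hlen : s.length = l.length := hperm.length_eq
  have hmono : ∀ (p q : ℕ) (hpq : p ≤ q) (hq : q < s.length),
      s[p]'(lt_of_le_of_lt hpq hq) ≤ s[q] := by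
    intro p q hpq hq
    simp only [hs] at hq ⊢
    exact PySem.List.sorted_id_getElem_mono l hpq hq
  by_cases h2 : 2 ≤ l.length
  · rw [if_pos h2]
    rw [Bool.eq_iff_iff, adjAny_iff, pairAny_iff, idx_iff_sublist]
    rw [← sorted_pair_iff_adj s hmono, idx_iff_sublist]
    exact ⟨fun h => sublist_form_of_perm hperm h, fun h => sublist_form_of_perm hperm.symm h⟩
  · rw [if_neg h2]
    symm
    rw [Bool.eq_false_iff]
    intro hb
    obtain ⟨i, j, hi, hj, hij, _⟩ := (pairAny_iff l).mp hb
    omega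

-- ===== VERDICT (by name: the statement is the Claim_ definition above) =====
theorem check_technical_term_proximity_py_spec : Claim_equal_check_technical_term_proximity_py := by
  intro text keywords _
  unfold Spec_check_technical_term_proximity_py
  unfold check_technical_term_proximity_py check_technical_term_proximity_py_alt
  exact main_lemma (pvCollect text keywords)
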